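-- pv_equiv track=rewrite | github.com/alqz/function_ordering | reorder.py | reorder_lines
-- ===== SOURCE A (Python) =====
-- def reorder_lines(lines, partitions, ordered_function_names):
--     order_spec = {
--         ordered_function_names[i]: i for i in range(
--             len(ordered_function_names))}
--     c = 0
--     acc = []
--     # We need starts to be right after the end of the previous, rather than
--     # where 'def' is.
--     for start, function_name, end in partitions:
--         acc.append((order_spec[function_name], c, end))
--         c = end
--     new_lines = []
--     for _, start, end in sorted(acc):
--         new_lines += lines[start:end]
--     # Append the rest of the lines occuring after the last function
--     new_lines += lines[c:]
--     return new_lines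
-- ===== SOURCE B (Python) =====
-- def reorder_lines(lines, partitions, ordered_function_names):
--     rank = {}
--     for i, name in enumerate(ordered_function_names):
--         rank[name] = i
--     # bucket the blocks by the rank of their function name (counting-sort style);
--     # each block starts right after the previous block's end
--     buckets = [[] for _ in ordered_function_names]
--     prev = 0
--     for _start, name, end in partitions:
--         buckets[rank[name]].append((prev, end))
--         prev = end
--     reordered = [ln
--                  for bucket in buckets
--                  for s, e in sorted(bucket)
--                  for ln in lines[s:e]]
--     return reordered + lines[prev:]
-- ===== Notes on version B (the rewrite author's own statement) =====
-- stated objective: alternative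
-- what changed: Replaces the global comparison sort of (rank,start,end) triples by rank-indexed buckets (counting-sort style) filled in one pass and emitted bucket by bucket via a nested comprehension, with only small per-bucket sorts of the (start,end) pairs; the rank dict is built with enumerate instead of an index comprehension.
import Mathlib
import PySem

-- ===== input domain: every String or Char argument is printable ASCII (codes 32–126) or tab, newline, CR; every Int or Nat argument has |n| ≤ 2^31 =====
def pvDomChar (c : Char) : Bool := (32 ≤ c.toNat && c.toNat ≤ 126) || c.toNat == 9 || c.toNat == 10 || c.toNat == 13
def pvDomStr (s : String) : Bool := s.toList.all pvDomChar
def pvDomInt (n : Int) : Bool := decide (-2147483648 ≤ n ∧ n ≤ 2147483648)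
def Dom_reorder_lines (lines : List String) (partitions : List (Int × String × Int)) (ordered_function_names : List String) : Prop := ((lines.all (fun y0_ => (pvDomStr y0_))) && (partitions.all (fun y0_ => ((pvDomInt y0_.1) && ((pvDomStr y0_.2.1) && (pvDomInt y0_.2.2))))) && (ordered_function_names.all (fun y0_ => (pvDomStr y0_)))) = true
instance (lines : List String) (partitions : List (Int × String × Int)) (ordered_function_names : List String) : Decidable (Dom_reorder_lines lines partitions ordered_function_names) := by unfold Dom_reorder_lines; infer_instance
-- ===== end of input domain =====

-- B replaces A's global comparison sort of (rank,start,end) triples by rank-indexed buckets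
-- (counting-sort style) filled in one pass and emitted via a nested comprehension with small
-- per-bucket sorts of the (start,end) pairs; alternative algorithm, same results.


-- ===== PORT A =====
-- the dict comprehension {ordered_function_names[i]: i for i in range(len(...))}
def pvBuildSpec (names : List String) : PySem.Dict String Int :=
  (PySem.List.pyRange 0 names.length 1).foldl
    (fun d i => d.insert (PySem.List.pyGetD names i "") i) PySem.Dict.empty

-- hand port of Python's sorted() on int triples: tuple lexicographic comparison, stable
-- insertion sort (exact: a stable sort under a total order is unique)
def pvLt3 (a b : Int × Int × Int) : Bool :=
  decide (a.1 < b.1) || (a.1 == b.1 && (decide (a.2.1 < b.2.1) || (a.2.1 == b.2.1 && decide (a.2.2 < b.2.2))))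

def pvIns3 (x : Int × Int × Int) : List (Int × Int × Int) → List (Int × Int × Int)
  | [] => [x]
  | y :: ys => if pvLt3 x y then x :: y :: ys else y :: pvIns3 x ys

def pvSort3 (xs : List (Int × Int × Int)) : List (Int × Int × Int) :=
  xs.foldl (fun s x => pvIns3 x s) []

def reorder_lines (lines : List String) (partitions : List (Int × String × Int)) (ordered_function_names : List String) : List String :=
  let spec := pvBuildSpec ordered_function_names
  -- for start, function_name, end in partitions: acc.append((order_spec[name], c, end)); c = end
  -- (order_spec[name] raises KeyError on a missing name: excluded by Pre_; getD 0 is the port's junk value there)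
  let st := partitions.foldl
    (fun (p : Int × List (Int × Int × Int)) t =>
      (t.2.2, p.2 ++ [((spec.get? t.2.1).getD 0, p.1, t.2.2)])) ((0 : Int), [])
  let newl := (pvSort3 st.2).foldl
    (fun nl t => nl ++ PySem.List.slice lines (some t.2.1) (some t.2.2)) ([] : List String)
  newl ++ PySem.List.slice lines (some st.1) none

-- ===== PORT B =====
-- rank = {}; for i, name in enumerate(ordered_function_names): rank[name] = i
def pvRank (names : List String) : PySem.Dict String Int :=
  (PySem.List.enumerate names).foldl (fun d p => d.insert p.2 p.1) PySem.Dict.empty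

-- Python's sorted() on int pairs, ported as Lean's stable library sort with the
-- tuple-lexicographic ≤ (exact: stable sort under a total order is unique)
def pvLeB (a b : Int × Int) : Bool :=
  decide (a.1 < b.1) || (a.1 == b.1 && decide (a.2 ≤ b.2))

-- buckets[i].append(q)
def pvBPut (i : Nat) (q : Int × Int) : List (List (Int × Int)) → List (List (Int × Int))
  | [] => []
  | b :: bs => match i with
    | 0 => (b ++ [q]) :: bs
    | i' + 1 => b :: pvBPut i' q bs

def reorder_lines_alt (lines : List String) (partitions : List (Int × String × Int)) (ordered_function_names : List String) : List String :=
  let rank := pvRank ordered_function_names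
  -- buckets = [[] for _ in ordered_function_names]; one pass appending (prev, end) at rank[name]
  let st := partitions.foldl
    (fun (p : Int × List (List (Int × Int))) t =>
      (t.2.2, pvBPut ((rank.get? t.2.1).getD 0).toNat (p.1, t.2.2) p.2))
    ((0 : Int), ordered_function_names.map (fun _ => ([] : List (Int × Int))))
  -- [ln for bucket in buckets for s, e in sorted(bucket) for ln in lines[s:e]] + lines[prev:]
  st.2.flatMap (fun bucket => (bucket.mergeSort pvLeB).flatMap
      (fun q => PySem.List.slice lines (some q.1) (some q.2)))
    ++ PySem.List.slice lines (some st.1) none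

-- ===== PRECONDITION & SPEC =====
-- Pre_ excludes exactly the inputs where Python A raises KeyError: a partition whose
-- function name is not in ordered_function_names.
def Pre_reorder_lines (lines : List String) (partitions : List (Int × String × Int)) (ordered_function_names : List String) : Prop :=
  ∀ t ∈ partitions, t.2.1 ∈ ordered_function_names
instance (lines : List String) (partitions : List (Int × String × Int)) (ordered_function_names : List String) : Decidable (Pre_reorder_lines lines partitions ordered_function_names) := by unfold Pre_reorder_lines; infer_instance

def pvWitness_reorder_lines : List String × (List (Int × String × Int)) × List String :=
  (["a", "b", "c", "d"], [(0, "g", 1), (1, "f", 3)], ["f", "g"])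

def Spec_reorder_lines (lines : List String) (partitions : List (Int × String × Int)) (ordered_function_names : List String) (out : List String) : Prop := out = reorder_lines_alt lines partitions ordered_function_names
instance (lines : List String) (partitions : List (Int × String × Int)) (ordered_function_names : List String) (out : List String) : Decidable (Spec_reorder_lines lines partitions ordered_function_names out) := by unfold Spec_reorder_lines; infer_instance

-- ===== CLAIM (what is proved, stated in full; the proofs are below) =====
def Claim_equal_reorder_lines : Prop := ∀ (lines : List String) (partitions : List (Int × String × Int)) (ordered_function_names : List String), Dom_reorder_lines lines partitions ordered_function_names → Pre_reorder_lines lines partitions ordered_function_names → Spec_reorder_lines lines partitions ordered_function_names (reorder_lines lines partitions ordered_function_names)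

-- ===== LEMMAS AND PROOFS =====

-- proof-side stable insertion sort on pairs (the canonical form both sorts are reduced to)
def pvLt2 (a b : Int × Int) : Bool :=
  decide (a.1 < b.1) || (a.1 == b.1 && decide (a.2 < b.2))

def pvIns2 (x : Int × Int) : List (Int × Int) → List (Int × Int)
  | [] => [x]
  | y :: ys => if pvLt2 x y then x :: y :: ys else y :: pvIns2 x ys

def pvSort2 (xs : List (Int × Int)) : List (Int × Int) :=
  xs.foldl (fun s x => pvIns2 x s) []

-- pvFlat base [L0, L1, ...] tags bucket Lj's pairs with rank base+j and concatenates
def pvFlat (base : Int) : List (List (Int × Int)) → List (Int × Int × Int)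
  | [] => []
  | b :: bs => b.map (fun q => (base, q.1, q.2)) ++ pvFlat (base + 1) bs

-- update the i-th bucket
def pvUpd (i : Nat) (f : List (Int × Int) → List (Int × Int)) : List (List (Int × Int)) → List (List (Int × Int))
  | [] => []
  | b :: bs => match i with
    | 0 => f b :: bs
    | i' + 1 => b :: pvUpd i' f bs

-- the two rank dictionaries coincide
theorem pvRank_eq_pvBuildSpec (names : List String) : pvRank names = pvBuildSpec names := by
  unfold pvRank pvBuildSpec
  rw [PySem.List.enumerate_eq_map_pyRange names "", List.foldl_map]
  rfl

-- B's library sort equals the canonical insertion sort (both sorted, same multiset, lex order antisymmetric)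
theorem pvIns2_perm (x : Int × Int) (ys : List (Int × Int)) : (pvIns2 x ys).Perm (x :: ys) := by
  induction ys with
  | nil => simp [pvIns2]
  | cons y ys ih =>
    by_cases h : pvLt2 x y = true
    · simp [pvIns2, h]
    · rw [pvIns2, if_neg h]
      exact ((ih.cons y).trans (List.Perm.swap x y ys))

theorem pvLeB_of_not_pvLt2 (x y : Int × Int) (h : pvLt2 x y = false) : pvLeB y x = true := by
  simp only [pvLt2, pvLeB, Bool.or_eq_false_iff, Bool.or_eq_true, Bool.and_eq_false_iff,
    Bool.and_eq_true, decide_eq_false_iff_not, decide_eq_true_eq, beq_iff_eq, beq_eq_false_iff_ne] at *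
  omega

theorem pvLeB_of_pvLt2 (x y : Int × Int) (h : pvLt2 x y = true) : pvLeB x y = true := by
  simp only [pvLt2, pvLeB, Bool.or_eq_true, Bool.and_eq_true, decide_eq_true_eq, beq_iff_eq] at *
  omega

theorem pvIns2_pairwise (x : Int × Int) (ys : List (Int × Int))
    (h : ys.Pairwise (fun a b => pvLeB a b = true)) :
    (pvIns2 x ys).Pairwise (fun a b => pvLeB a b = true) := by
  induction ys with
  | nil => simp [pvIns2]
  | cons y ys ih =>
    rcases List.pairwise_cons.mp h with ⟨hy, hys⟩
    by_cases hlt : pvLt2 x y = true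
    · rw [pvIns2, if_pos hlt]
      refine List.pairwise_cons.mpr ⟨?_, h⟩
      intro z hz
      rcases List.mem_cons.mp hz with rfl | hz
      · exact pvLeB_of_pvLt2 x z hlt
      · -- pvLeB x y and pvLeB y z give pvLeB x z
        have h1 := pvLeB_of_pvLt2 x y hlt
        have h2 := hy z hz
        simp only [pvLeB, Bool.or_eq_true, Bool.and_eq_true, decide_eq_true_eq, beq_iff_eq] at *
        omega
    · rw [pvIns2, if_neg (by simpa using hlt)]
      refine List.pairwise_cons.mpr ⟨?_, ih hys⟩
      intro z hz
      have hz' := (pvIns2_perm x ys).mem_iff.mp hz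
      rcases List.mem_cons.mp hz' with rfl | hz'
      · exact pvLeB_of_not_pvLt2 z y (by simpa using hlt)
      · exact hy z hz'

theorem pvSort2_inv (xs acc : List (Int × Int))
    (h : acc.Pairwise (fun a b => pvLeB a b = true)) :
    (xs.foldl (fun s x => pvIns2 x s) acc).Pairwise (fun a b => pvLeB a b = true)
    ∧ (xs.foldl (fun s x => pvIns2 x s) acc).Perm (acc ++ xs) := by
  induction xs generalizing acc with
  | nil => simpa using h
  | cons x xs ih =>
    obtain ⟨h1, h2⟩ := ih (pvIns2 x acc) (pvIns2_pairwise x acc h)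
    refine ⟨h1, h2.trans ?_⟩
    exact ((pvIns2_perm x acc).append_right xs).trans List.perm_middle.symm

theorem mergeSort_eq_pvSort2 (b : List (Int × Int)) : b.mergeSort pvLeB = pvSort2 b := by
  have htrans : ∀ a c d : Int × Int, pvLeB a c = true → pvLeB c d = true → pvLeB a d = true := by
    intro a c d h1 h2
    simp only [pvLeB, Bool.or_eq_true, Bool.and_eq_true, decide_eq_true_eq, beq_iff_eq] at *
    omega
  have htotal : ∀ a c : Int × Int, (pvLeB a c || pvLeB c a) = true := by
    intro a c
    simp only [pvLeB, Bool.or_eq_true, Bool.and_eq_true, decide_eq_true_eq, beq_iff_eq]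
    omega
  obtain ⟨hs2, hp2⟩ := pvSort2_inv b [] (by simp)
  apply PySem.List.eq_of_perm_of_pairwise_le_of_injective (key := fun q : Int × Int => toLex q)
    (fun a c h => by simpa using h)
    ((List.mergeSort_perm b pvLeB).trans (by simpa using hp2.symm))
  · refine (List.pairwise_mergeSort htrans htotal b).imp ?_
    intro a c h
    simp only [pvLeB, Bool.or_eq_true, Bool.and_eq_true, decide_eq_true_eq, beq_iff_eq] at h
    rcases h with h | ⟨h1, h2⟩
    · exact Prod.Lex.le_iff.mpr (Or.inl h)
    · exact Prod.Lex.le_iff.mpr (Or.inr ⟨h1, h2⟩)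
  · refine hs2.imp ?_
    intro a c h
    simp only [pvLeB, Bool.or_eq_true, Bool.and_eq_true, decide_eq_true_eq, beq_iff_eq] at h
    rcases h with h | ⟨h1, h2⟩
    · exact Prod.Lex.le_iff.mpr (Or.inl h)
    · exact Prod.Lex.le_iff.mpr (Or.inr ⟨h1, h2⟩)

theorem pvSort3_append (xs : List (Int × Int × Int)) (t : Int × Int × Int) :
    pvSort3 (xs ++ [t]) = pvIns3 t (pvSort3 xs) := by
  simp [pvSort3, List.foldl_append]

theorem pvSort2_append (xs : List (Int × Int)) (q : Int × Int) :
    pvSort2 (xs ++ [q]) = pvIns2 q (pvSort2 xs) := by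
  simp [pvSort2, List.foldl_append]

theorem pvIns3_skip (x : Int × Int × Int) (block rest : List (Int × Int × Int))
    (h : ∀ y ∈ block, pvLt3 x y = false) :
    pvIns3 x (block ++ rest) = block ++ pvIns3 x rest := by
  induction block with
  | nil => rfl
  | cons y ys ih =>
    have hy := h y (by simp)
    have hrest := ih (fun z hz => h z (by simp [hz]))
    simp [pvIns3, hy, hrest]

theorem pvIns3_front (x : Int × Int × Int) (ys : List (Int × Int × Int))
    (h : ∀ y ∈ ys, pvLt3 x y = true) :
    pvIns3 x ys = x :: ys := by
  cases ys with
  | nil => rfl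
  | cons y ys => simp [pvIns3, h y (by simp)]

theorem pvLt3_tag (r : Int) (a b : Int × Int) :
    pvLt3 (r, a.1, a.2) (r, b.1, b.2) = pvLt2 a b := by
  simp [pvLt3, pvLt2]

theorem pvLt3_true_of_lt (x y : Int × Int × Int) (h : x.1 < y.1) : pvLt3 x y = true := by
  simp [pvLt3]; omega

theorem pvLt3_false_of_gt (x y : Int × Int × Int) (h : y.1 < x.1) : pvLt3 x y = false := by
  simp only [pvLt3, Bool.or_eq_false_iff, Bool.and_eq_false_iff, decide_eq_false_iff_not, beq_eq_false_iff_ne]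
  constructor
  · omega
  · left; omega

theorem mem_pvFlat_rank (base : Int) (Ls : List (List (Int × Int))) :
    ∀ y ∈ pvFlat base Ls, base ≤ y.1 := by
  induction Ls generalizing base with
  | nil => simp [pvFlat]
  | cons b bs ih =>
    intro y hy
    simp only [pvFlat, List.mem_append, List.mem_map] at hy
    rcases hy with ⟨q, _, rfl⟩ | hy
    · exact le_refl _
    · have := ih (base + 1) y hy; omega

theorem pvIns3_tag (r : Int) (q : Int × Int) (M : List (Int × Int)) (tail : List (Int × Int × Int))
    (h : ∀ y ∈ tail, r < y.1) :
    pvIns3 (r, q.1, q.2) (M.map (fun p => (r, p.1, p.2)) ++ tail)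
      = (pvIns2 q M).map (fun p => (r, p.1, p.2)) ++ tail := by
  induction M with
  | nil =>
    simp only [List.map_nil, List.nil_append, pvIns2]
    rw [pvIns3_front]
    · simp
    · intro y hy
      exact pvLt3_true_of_lt _ _ (h y hy)
  | cons p M ih =>
    simp only [List.map_cons, List.cons_append, pvIns3, pvLt3_tag, pvIns2]
    by_cases hlt : pvLt2 q p = true
    · simp [hlt]
    · simp only [Bool.not_eq_true] at hlt
      simp [hlt, ih]

theorem pvIns3_pvFlat (base : Int) (i : Nat) (q : Int × Int) (Ls : List (List (Int × Int)))
    (hi : i < Ls.length) :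
    pvIns3 (base + (i : Int), q.1, q.2) (pvFlat base Ls)
      = pvFlat base (pvUpd i (pvIns2 q) Ls) := by
  induction Ls generalizing base i with
  | nil => simp at hi
  | cons b bs ih =>
    match i with
    | 0 =>
      simp only [Int.natCast_zero, add_zero, pvFlat, pvUpd]
      exact pvIns3_tag base q b (pvFlat (base + 1) bs)
        (fun y hy => by have := mem_pvFlat_rank (base + 1) bs y hy; omega)
    | i' + 1 =>
      simp only [pvFlat, pvUpd]
      rw [pvIns3_skip]
      · have : base + ((i' + 1 : Nat) : Int) = (base + 1) + (i' : Int) := by push_cast; ring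
        rw [this, ih (base + 1) i' (by simpa using hi)]
      · intro y hy
        simp only [List.mem_map] at hy
        rcases hy with ⟨p, _, rfl⟩
        apply pvLt3_false_of_gt
        simp only []
        push_cast
        omega

theorem map_pvBPut (i : Nat) (q : Int × Int) (bs : List (List (Int × Int))) :
    (pvBPut i q bs).map pvSort2 = pvUpd i (pvIns2 q) (bs.map pvSort2) := by
  induction bs generalizing i with
  | nil => simp [pvBPut, pvUpd]
  | cons b bs ih =>
    match i with
    | 0 => simp [pvBPut, pvUpd, pvSort2_append]
    | i' + 1 => simp [pvBPut, pvUpd, ih]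

theorem length_pvBPut (i : Nat) (q : Int × Int) (bs : List (List (Int × Int))) :
    (pvBPut i q bs).length = bs.length := by
  induction bs generalizing i with
  | nil => simp [pvBPut]
  | cons b bs ih =>
    match i with
    | 0 => simp [pvBPut]
    | i' + 1 => simp [pvBPut, ih]

-- values produced by the comprehension fold are among the inserted indices
theorem buildSpec_fold_values (L : List Int) (f : Int → String) (d : PySem.Dict String Int)
    (name : String) (v : Int)
    (h : (L.foldl (fun d i => d.insert (f i) i) d).get? name = some v) :
    (∃ i ∈ L, v = i) ∨ d.get? name = some v := by
  induction L generalizing d with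
  | nil => exact Or.inr h
  | cons i L ih =>
    rcases ih (d.insert (f i) i) h with hmem | hd
    · rcases hmem with ⟨j, hj, hvj⟩; exact Or.inl ⟨j, List.mem_cons_of_mem _ hj, hvj⟩
    · rw [PySem.Dict.get?_insert] at hd
      split at hd
      · exact Or.inl ⟨i, List.mem_cons_self, (Option.some.inj hd).symm⟩
      · exact Or.inr hd

theorem buildSpec_fold_some (L : List Int) (f : Int → String) (d : PySem.Dict String Int)
    (name : String) (h : (∃ i ∈ L, f i = name) ∨ (∃ w, d.get? name = some w)) :
    ∃ v, (L.foldl (fun d i => d.insert (f i) i) d).get? name = some v := by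
  induction L generalizing d with
  | nil =>
    rcases h with ⟨i, hi, _⟩ | hw
    · simp at hi
    · exact hw
  | cons i L ih =>
    apply ih (d.insert (f i) i)
    rcases h with ⟨j, hj, hfj⟩ | ⟨w, hw⟩
    · simp only [List.mem_cons] at hj
      rcases hj with hji | hj
      · subst hji
        exact Or.inr ⟨j, by rw [← hfj]; exact PySem.Dict.get?_insert_self _ _ _⟩
      · exact Or.inl ⟨j, hj, hfj⟩
    · by_cases he : name = f i
      · subst he; exact Or.inr ⟨i, PySem.Dict.get?_insert_self _ _ _⟩
      · exact Or.inr ⟨w, by rw [PySem.Dict.get?_insert_of_ne _ _ he]; exact hw⟩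

theorem buildSpec_mem (names : List String) (name : String) (hmem : name ∈ names) :
    ∃ v, (pvBuildSpec names).get? name = some v ∧ 0 ≤ v ∧ v < names.length := by
  obtain ⟨j, hj, rfl⟩ := List.mem_iff_getElem.mp hmem
  have hsome : ∃ v, (pvBuildSpec names).get? names[j] = some v := by
    apply buildSpec_fold_some
    refine Or.inl ⟨(j : Int), ?_, ?_⟩
    · rw [PySem.List.mem_pyRange_one]
      constructor
      · positivity
      · exact_mod_cast hj
    · rw [PySem.List.pyGetD_natCast]
      exact List.getD_eq_getElem names "" hj
  obtain ⟨v, hv⟩ := hsome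
  refine ⟨v, hv, ?_⟩
  rcases buildSpec_fold_values _ _ _ _ _ hv with ⟨i, hi, rfl⟩ | hd
  · rw [PySem.List.mem_pyRange_one] at hi; omega
  · simp [PySem.Dict.get?_empty] at hd

theorem pvFlat_empties (base : Int) (names : List String) :
    pvFlat base (names.map (fun _ => ([] : List (Int × Int)))) = [] := by
  induction names generalizing base with
  | nil => rfl
  | cons n ns ih =>
    simp only [List.map_cons, pvFlat, List.map_nil, List.nil_append]
    exact ih (base + 1)

-- the simultaneous invariant over the partitions pass
theorem main_inv (spec : PySem.Dict String Int) (k : Nat)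
    (parts : List (Int × String × Int))
    (hok : ∀ t ∈ parts, ∃ v, spec.get? t.2.1 = some v ∧ 0 ≤ v ∧ v < (k : Int)) :
    ∀ (c : Int) (acc : List (Int × Int × Int)) (bs : List (List (Int × Int))),
    bs.length = k → pvSort3 acc = pvFlat 0 (bs.map pvSort2) →
    (parts.foldl (fun (p : Int × List (Int × Int × Int)) t =>
        (t.2.2, p.2 ++ [((spec.get? t.2.1).getD 0, p.1, t.2.2)])) (c, acc)).1
      = (parts.foldl (fun (p : Int × List (List (Int × Int))) t =>
        (t.2.2, pvBPut ((spec.get? t.2.1).getD 0).toNat (p.1, t.2.2) p.2)) (c, bs)).1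
    ∧ (parts.foldl (fun (p : Int × List (List (Int × Int))) t =>
        (t.2.2, pvBPut ((spec.get? t.2.1).getD 0).toNat (p.1, t.2.2) p.2)) (c, bs)).2.length = k
    ∧ pvSort3 (parts.foldl (fun (p : Int × List (Int × Int × Int)) t =>
        (t.2.2, p.2 ++ [((spec.get? t.2.1).getD 0, p.1, t.2.2)])) (c, acc)).2
      = pvFlat 0 ((parts.foldl (fun (p : Int × List (List (Int × Int))) t =>
        (t.2.2, pvBPut ((spec.get? t.2.1).getD 0).toNat (p.1, t.2.2) p.2)) (c, bs)).2.map pvSort2) := by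
  induction parts with
  | nil => intro c acc bs hlen hinv; exact ⟨rfl, hlen, hinv⟩
  | cons t parts ih =>
    intro c acc bs hlen hinv
    obtain ⟨v, hv, hv0, hvk⟩ := hok t (by simp)
    have hr : (spec.get? t.2.1).getD 0 = v := by rw [hv]; rfl
    simp only [List.foldl_cons]
    apply ih (fun u hu => hok u (by simp [hu]))
    · rw [length_pvBPut]; exact hlen
    · rw [pvSort3_append, map_pvBPut, hinv, hr]
      have := pvIns3_pvFlat 0 v.toNat (c, t.2.2) (bs.map pvSort2)
        (by rw [List.length_map, hlen]; omega)
      rw [show (0 : Int) + ((v.toNat : Nat) : Int) = v by omega] at this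
      exact this

theorem pvFlat_flatMap (lines : List String) (base : Int) (Ls : List (List (Int × Int))) :
    (pvFlat base Ls).flatMap (fun t => PySem.List.slice lines (some t.2.1) (some t.2.2))
      = Ls.flatMap (fun b => b.flatMap (fun q => PySem.List.slice lines (some q.1) (some q.2))) := by
  induction Ls generalizing base with
  | nil => rfl
  | cons b bs ih =>
    simp only [pvFlat, List.flatMap_append, List.flatMap_cons, ih, List.flatMap_map]

-- ===== VERDICT (by name: the statement is the Claim_ definition above) =====
theorem reorder_lines_spec : Claim_equal_reorder_lines := by
  intro lines partitions names _hdom hpre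
  unfold Spec_reorder_lines reorder_lines reorder_lines_alt
  dsimp only
  rw [pvRank_eq_pvBuildSpec]
  have hok : ∀ t ∈ partitions, ∃ v, (pvBuildSpec names).get? t.2.1 = some v ∧ 0 ≤ v ∧ v < (names.length : Int) := by
    intro t ht
    obtain ⟨v, hv, h0, hk⟩ := buildSpec_mem names t.2.1 (hpre t ht)
    exact ⟨v, hv, h0, by exact_mod_cast hk⟩
  obtain ⟨hc, hlen, hsort⟩ := main_inv (pvBuildSpec names) names.length partitions hok 0 []
    (names.map (fun _ => ([] : List (Int × Int))))
    (by simp)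
    (by rw [show (names.map (fun _ => ([] : List (Int × Int)))).map pvSort2
              = names.map (fun _ => ([] : List (Int × Int))) by simp [pvSort2],
            pvFlat_empties]; rfl)
  rw [hc]
  congr 1
  rw [PySem.List.foldl_append_eq_flatMap, List.nil_append, hsort, pvFlat_flatMap,
      List.flatMap_map]
  congr 1
  funext b
  rw [mergeSort_eq_pvSort2]
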